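-- pv_equiv track=rewrite | github.com/jur-ch1k/Flask_ss | app/admin/routes.py | generate
-- ===== SOURCE A (Python) =====
-- def generate(program, bounds):
--     """generate all possible combinations of params"""
--     result = [program]
--
--     for name, values in bounds:
--         new_result = []
--         for old_program in result:
--             for value in values:
--                 new_result.append(old_program.replace(name, str(value)))
--
--         result = new_result
--     return result
-- ===== SOURCE B (Python) =====
-- import itertools
--
-- def generate(program, bounds):
--     """generate all possible combinations of params"""
--     names = [name for name, _ in bounds]
--     value_lists = [values for _, values in bounds]
--     result = []
--     for combo in itertools.product(*value_lists):
--         s = program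
--         for name, value in zip(names, combo):
--             s = s.replace(name, str(value))
--         result.append(s)
--     return result
-- ===== Notes on version B (the rewrite author's own statement) =====
-- stated objective: idiomatic
-- what changed: Instead of expanding the result list one bound at a time (rebuilding the whole list at each bound), B enumerates the Cartesian product of the value lists with itertools.product and maps each tuple to a string by sequential replaces.
import Mathlib
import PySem

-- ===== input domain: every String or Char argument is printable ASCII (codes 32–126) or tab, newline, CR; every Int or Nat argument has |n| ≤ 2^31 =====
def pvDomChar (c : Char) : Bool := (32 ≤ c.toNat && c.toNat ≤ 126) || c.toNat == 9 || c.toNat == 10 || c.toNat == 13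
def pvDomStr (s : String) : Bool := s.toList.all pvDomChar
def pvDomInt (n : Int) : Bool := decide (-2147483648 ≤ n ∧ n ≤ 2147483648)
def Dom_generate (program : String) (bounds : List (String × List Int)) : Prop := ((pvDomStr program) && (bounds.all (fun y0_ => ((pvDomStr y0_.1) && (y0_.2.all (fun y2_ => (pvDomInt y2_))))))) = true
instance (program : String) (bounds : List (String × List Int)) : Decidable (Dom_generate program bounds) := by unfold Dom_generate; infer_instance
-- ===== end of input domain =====

-- B generates the Cartesian product of the value lists up front and maps each tuple
-- to its string (objective: idiomatic); A expands the result list one bound at a time.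

-- ===== PORT A =====
-- literal port of A: fold over bounds, rebuilding the whole result list each time
def generate (program : String) (bounds : List (String × List Int)) : List String :=
  bounds.foldl
    (fun result p =>
      result.foldl
        (fun newResult oldProgram =>
          p.2.foldl
            (fun nr v => nr ++ [PySem.Str.replace oldProgram p.1 (PySem.Int.toStr v)])
            newResult)
        [])
    [program]

-- ===== PORT B =====
-- itertools.product(*value_lists): first list varies slowest
def pvProduct : List (List Int) → List (List Int)
  | [] => [[]]
  | vs :: rest => vs.flatMap (fun x => (pvProduct rest).map (x :: ·))

def generate_alt (program : String) (bounds : List (String × List Int)) : List String :=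
  let names := bounds.map Prod.fst
  let valueLists := bounds.map Prod.snd
  (pvProduct valueLists).map (fun combo =>
    (names.zip combo).foldl
      (fun s nv => PySem.Str.replace s nv.1 (PySem.Int.toStr nv.2))
      program)

-- ===== PRECONDITION & SPEC =====
def Spec_generate (program : String) (bounds : List (String × List Int)) (out : List String) : Prop := out = generate_alt program bounds
instance (program : String) (bounds : List (String × List Int)) (out : List String) : Decidable (Spec_generate program bounds out) := by unfold Spec_generate; infer_instance

-- ===== CLAIM (what is proved, stated in full; the proofs are below) =====
def Claim_equal_generate : Prop := ∀ (program : String) (bounds : List (String × List Int)), Dom_generate program bounds → Spec_generate program bounds (generate program bounds)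

-- ===== LEMMAS AND PROOFS =====

-- recursive characterisation shared by both ports
def genRec (program : String) : List (String × List Int) → List String
  | [] => [program]
  | p :: bs => p.2.flatMap (fun v => genRec (PySem.Str.replace program p.1 (PySem.Int.toStr v)) bs)

-- B equals the recursive characterisation
lemma alt_eq_genRec (program : String) (bounds : List (String × List Int)) :
    generate_alt program bounds = genRec program bounds := by
  induction bounds generalizing program with
  | nil => rfl
  | cons p bs ih =>
    simp only [generate_alt] at ih ⊢
    simp only [pvProduct, genRec, List.map_cons, List.map_flatMap]
    congr 1
    funext v
    simpa [Function.comp] using ih (PySem.Str.replace program p.1 (PySem.Int.toStr v))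

-- one step of A's outer loop, rewritten with flatMap
lemma step_eq (R : List String) (p : String × List Int) :
    R.foldl
      (fun newResult oldProgram =>
        p.2.foldl (fun nr v => nr ++ [PySem.Str.replace oldProgram p.1 (PySem.Int.toStr v)]) newResult)
      [] =
    R.flatMap (fun old => p.2.map (fun v => PySem.Str.replace old p.1 (PySem.Int.toStr v))) := by
  have h : ∀ old acc, p.2.foldl
      (fun nr v => nr ++ [PySem.Str.replace old p.1 (PySem.Int.toStr v)]) acc
      = acc ++ p.2.map (fun v => PySem.Str.replace old p.1 (PySem.Int.toStr v)) := by
    intro old acc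
    exact PySem.List.foldl_append_singleton_eq_map ..
  calc R.foldl (fun newResult oldProgram =>
        p.2.foldl (fun nr v => nr ++ [PySem.Str.replace oldProgram p.1 (PySem.Int.toStr v)]) newResult) []
      = R.foldl (fun acc old => acc ++ p.2.map (fun v => PySem.Str.replace old p.1 (PySem.Int.toStr v))) [] := by
        exact List.foldl_ext _ _ _ (fun acc old _ => h old acc)
    _ = _ := by
        simpa using PySem.List.foldl_append_eq_flatMap
          (fun old => p.2.map (fun v => PySem.Str.replace old p.1 (PySem.Int.toStr v))) R []

-- A's loop, started from any result list R, is a flatMap of the recursive characterisation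
lemma loopA_eq (bounds : List (String × List Int)) (R : List String) :
    bounds.foldl
      (fun result p =>
        result.foldl
          (fun newResult oldProgram =>
            p.2.foldl (fun nr v => nr ++ [PySem.Str.replace oldProgram p.1 (PySem.Int.toStr v)]) newResult)
          [])
      R =
    R.flatMap (fun s => genRec s bounds) := by
  induction bounds generalizing R with
  | nil => simp [genRec]
  | cons p bs ih =>
    rw [List.foldl_cons, step_eq, ih, List.flatMap_assoc]
    simp [genRec, List.flatMap_map]

-- ===== VERDICT (by name: the statement is the Claim_ definition above) =====
theorem generate_spec : Claim_equal_generate := by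
  intro program bounds _
  show generate program bounds = generate_alt program bounds
  rw [alt_eq_genRec, generate, loopA_eq]
  simp
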